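-- pv_equiv track=rewrite | github.com/SilviaJoJo/CS61A | projects/cats/cats.py | shifty_shifts
-- ===== SOURCE A (Python) =====
-- def shifty_shifts(start, goal, limit):
--     """A diff function for autocorrect that determines how many letters
--     in START need to be substituted to create GOAL, then adds the difference in
--     their lengths.
--     """
--     # BEGIN PROBLEM 6
--     if limit < 0:
--         return 0
--     if not start:
--         return len(goal)
--     elif not goal:
--         return len(start)
--     elif start[0] == goal[0]:
--         return shifty_shifts(start[1:], goal[1:], limit)
--     return 1 + shifty_shifts(start[1:], goal[1:], limit - 1)
-- ===== SOURCE B (Python) =====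
-- def shifty_shifts(start, goal, limit):
--     if limit < 0:
--         return 0
--     mism = sum(1 for a, b in zip(start, goal) if a != b)
--     if mism > limit:
--         return limit + 1
--     return mism + abs(len(start) - len(goal))
-- ===== Notes on version B (the rewrite author's own statement) =====
-- stated objective: alternative
-- what changed: Replaces the limit-threading recursion that truncates early with a single mismatch count over the zipped prefix followed by one closed-form comparison against the limit.
import Mathlib
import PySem

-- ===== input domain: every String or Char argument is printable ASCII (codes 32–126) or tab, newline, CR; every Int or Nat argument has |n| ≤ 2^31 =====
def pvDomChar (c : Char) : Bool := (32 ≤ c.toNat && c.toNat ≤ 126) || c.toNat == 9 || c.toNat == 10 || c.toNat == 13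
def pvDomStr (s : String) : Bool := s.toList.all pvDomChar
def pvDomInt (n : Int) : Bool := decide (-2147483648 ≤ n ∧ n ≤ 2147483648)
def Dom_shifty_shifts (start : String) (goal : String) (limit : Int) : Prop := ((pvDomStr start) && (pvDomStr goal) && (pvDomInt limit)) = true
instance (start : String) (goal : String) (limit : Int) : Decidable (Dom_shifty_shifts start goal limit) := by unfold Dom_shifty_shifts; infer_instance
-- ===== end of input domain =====

-- ===== PORT A =====
-- B differs from A by a count-then-compare decomposition instead of limit-threading recursion (equal value, similar cost).
def shiftyACore : List Char → List Char → Int → Int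
  | s, g, limit =>
    if limit < 0 then 0
    else
      match s, g with
      | [], g' => (g'.length : Int)
      | s', [] => (s'.length : Int)
      | a :: s', b :: g' =>
        if a = b then shiftyACore s' g' limit
        else 1 + shiftyACore s' g' (limit - 1)

def shifty_shifts (start : String) (goal : String) (limit : Int) : Int :=
  shiftyACore start.toList goal.toList limit

-- ===== PORT B =====
def mismCount : List Char → List Char → Int
  | a :: s, b :: g => (if a ≠ b then 1 else 0) + mismCount s g
  | _, _ => 0

def shifty_shifts_alt (start : String) (goal : String) (limit : Int) : Int :=
  if limit < 0 then 0
  else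
    let mism := mismCount start.toList goal.toList
    if mism > limit then limit + 1
    else mism + |(start.toList.length : Int) - (goal.toList.length : Int)|

-- ===== PRECONDITION & SPEC =====
def Spec_shifty_shifts (start : String) (goal : String) (limit : Int) (out : Int) : Prop := out = shifty_shifts_alt start goal limit
instance (start : String) (goal : String) (limit : Int) (out : Int) : Decidable (Spec_shifty_shifts start goal limit out) := by unfold Spec_shifty_shifts; infer_instance

-- ===== CLAIM (what is proved, stated in full; the proofs are below) =====
def Claim_equal_shifty_shifts : Prop := ∀ (start : String) (goal : String) (limit : Int), Dom_shifty_shifts start goal limit → Spec_shifty_shifts start goal limit (shifty_shifts start goal limit)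

-- ===== LEMMAS AND PROOFS =====
theorem mismCount_nonneg : ∀ (s g : List Char), 0 ≤ mismCount s g
  | a :: s, b :: g => by
    have := mismCount_nonneg s g
    simp only [mismCount]; split <;> omega
  | [], _ => by simp [mismCount]
  | _ :: _, [] => by simp [mismCount]

theorem core_eq : ∀ (s g : List Char) (l : Int),
    shiftyACore s g l =
      (if l < 0 then 0
       else
         if mismCount s g > l then l + 1
         else mismCount s g + |(s.length : Int) - (g.length : Int)|)
  | [], g, l => by
    simp only [shiftyACore, mismCount]
    split
    · rfl
    · have : ¬ ((0:Int) > l) := by omega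
      simp [abs_of_nonpos]
  | a :: s, [], l => by
    simp only [shiftyACore, mismCount]
    split
    · rfl
    · simp
      rw [abs_of_nonneg (by positivity)]
  | a :: s, b :: g, l => by
    have ih := core_eq s g l
    have ih' := core_eq s g (l - 1)
    have hn := mismCount_nonneg s g
    simp only [shiftyACore, mismCount] at *
    by_cases hl : l < 0
    · simp [hl]
    · simp only [hl, if_false]
      by_cases hab : a = b
      · simp only [hab, ne_eq, not_true_eq_false, if_false, if_true]
        rw [ih]; simp [hl]
      · simp only [hab, ne_eq, not_false_eq_true, if_true, if_false]
        rw [ih']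
        by_cases hl1 : l - 1 < 0
        · have : l = 0 := by omega
          subst this
          simp only [hl1, if_true]
          have h1 : mismCount s g + 1 > 0 := by omega
          have h2 : (1:Int) + mismCount s g > 0 := by omega
          simp [h2]
        · simp only [hl1, if_false]
          by_cases hm : mismCount s g > l - 1
          · have hm' : 1 + mismCount s g > l := by omega
            simp [hm, hm']; omega
          · have hm' : ¬ (1 + mismCount s g > l) := by omega
            simp [hm, hm']; omega

-- ===== VERDICT (by name: the statement is the Claim_ definition above) =====
theorem shifty_shifts_spec : Claim_equal_shifty_shifts := by
  intro start goal limit _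
  unfold Spec_shifty_shifts shifty_shifts shifty_shifts_alt
  rw [core_eq]
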